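-- pv_equiv track=rewrite | github.com/Elecapp/FRAMING | src/framing_rule_based/scoring.py | _has_negation_window
-- ===== SOURCE A (Python) =====
-- def _has_negation_window(text: str, term: str, window: int = 5) -> bool:
--     """
--     Return True if ``term`` appears within ``window`` tokens of a negation word.
--
--     Used to down-weight justification terms that are explicitly denied
--     (e.g. "non è gelosia").
--     """
--     _NEGATIONS = {"non", "nessun", "nessuna", "mai", "niente", "nulla"}
--     words = text.split()
--     for i, word in enumerate(words):
--         if term in word:
--             start = max(0, i - window)
--             end   = min(len(words), i + window + 1)
--             if set(words[start:end]) & _NEGATIONS: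
--                 return True
--     return False
-- ===== SOURCE B (Python) =====
-- def _has_negation_window(text: str, term: str, window: int = 5) -> bool:
--     """Two-phase: collect negation positions first, then scan term-bearing
--     tokens and test index distance |i - j| <= window."""
--     _NEGATIONS = {"non", "nessun", "nessuna", "mai", "niente", "nulla"}
--     words = text.split()
--     neg_idx = [j for j, w in enumerate(words) if w in _NEGATIONS]
--     for i, word in enumerate(words):
--         if term in word and any(i - window <= j <= i + window for j in neg_idx):
--             return True
--     return False
-- ===== Notes on version B (the rewrite author's own statement) =====
-- stated objective: alternative
-- what changed: B replaces A's per-hit slice + set-intersection with two phases: one pass collecting negation-word indices, then a scan of term-bearing tokens testing the index distance |i-j| <= window.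
-- outside the precondition, e.g. on _has_negation_window('gelosia a non b', 'gel', -2): A returns True, B returns False
import Mathlib
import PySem

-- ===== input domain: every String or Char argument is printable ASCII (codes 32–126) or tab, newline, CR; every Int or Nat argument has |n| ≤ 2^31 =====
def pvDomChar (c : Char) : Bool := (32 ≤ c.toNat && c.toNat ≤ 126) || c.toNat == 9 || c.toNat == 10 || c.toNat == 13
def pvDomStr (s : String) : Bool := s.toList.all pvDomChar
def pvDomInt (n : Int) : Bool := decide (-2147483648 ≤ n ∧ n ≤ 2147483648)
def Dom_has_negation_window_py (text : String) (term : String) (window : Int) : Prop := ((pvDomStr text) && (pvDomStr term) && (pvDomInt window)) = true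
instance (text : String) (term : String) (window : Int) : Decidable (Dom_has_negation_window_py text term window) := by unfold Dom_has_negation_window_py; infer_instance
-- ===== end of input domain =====

-- B replaces A's per-hit slice + set-intersection with a two-phase scan
-- (collect negation indices first, then test |i-j| <= window); objective: alternative.

-- ===== PORT A =====
-- _NEGATIONS = {"non", "nessun", "nessuna", "mai", "niente", "nulla"}  (shared set literal)
def pvNegations : PySem.Set String :=
  PySem.Set.ofList ["non", "nessun", "nessuna", "mai", "niente", "nulla"]

def has_negation_window_py (text : String) (term : String) (window : Int) : Bool :=
  let words := PySem.Str.split₀ text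
  -- for i, word in enumerate(words): if term in word and set(words[start:end]) & _NEGATIONS: return True
  (PySem.List.enumerate words 0).any (fun p =>
    PySem.Str.isIn term p.2 &&
      -- start = max(0, i - window); end = min(len(words), i + window + 1)
      !(PySem.Set.inter
          (PySem.Set.ofList
            (PySem.List.slice words (some (max 0 (p.1 - window)))
              (some (min (words.length : Int) (p.1 + window + 1)))))
          pvNegations).isEmpty)

-- ===== PORT B =====
-- neg_idx = [j for j, w in enumerate(words) if w in _NEGATIONS]
def pvNegIdx (words : List String) : List Int :=
  ((PySem.List.enumerate words 0).filter (fun p => pvNegations.contains p.2)).map (·.1)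

def has_negation_window_py_alt (text : String) (term : String) (window : Int) : Bool :=
  let words := PySem.Str.split₀ text
  let negIdx := pvNegIdx words
  -- for i, word in enumerate(words): if term in word and any(i-window <= j <= i+window ...): return True
  (PySem.List.enumerate words 0).any (fun p =>
    PySem.Str.isIn term p.2 &&
      negIdx.any (fun j => decide (p.1 - window ≤ j) && decide (j ≤ p.1 + window)))

-- ===== PRECONDITION & SPEC =====
-- Pre_ admits every window ≥ 0 (the natural domain) and also every negative window so
-- extreme that A's wrapped slice is provably empty; it excludes only the remaining
-- negative windows, where A's Python slice end-bound can wrap around and select an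
-- accidental range of tokens far from the match (see claim cites).
def Pre_has_negation_window_py (text : String) (term : String) (window : Int) : Prop :=
  0 ≤ window ∨ ((PySem.Str.split₀ text).length : Int) + 2 * window + 1 ≤ 0
instance (text : String) (term : String) (window : Int) : Decidable (Pre_has_negation_window_py text term window) := by unfold Pre_has_negation_window_py; infer_instance

def pvWitness_has_negation_window_py : String × String × Int := ("non e gelosia", "gel", 5)

def Spec_has_negation_window_py (text : String) (term : String) (window : Int) (out : Bool) : Prop := out = has_negation_window_py_alt text term window
instance (text : String) (term : String) (window : Int) (out : Bool) : Decidable (Spec_has_negation_window_py text term window out) := by unfold Spec_has_negation_window_py; infer_instance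

-- ===== CLAIM (what is proved, stated in full; the proofs are below) =====
def Claim_equal_has_negation_window_py : Prop := ∀ (text : String) (term : String) (window : Int), Dom_has_negation_window_py text term window → Pre_has_negation_window_py text term window → Spec_has_negation_window_py text term window (has_negation_window_py text term window)

-- ===== LEMMAS AND PROOFS =====

-- characterisation of B's first phase: j is a collected negation index
lemma mem_pvNegIdx (words : List String) (j : Int) :
    j ∈ pvNegIdx words ↔ ∃ m : Nat, ∃ _ : m < words.length, j = (m : Int) ∧ words[m] ∈ pvNegations := by
  unfold pvNegIdx
  simp only [List.mem_map, List.mem_filter, PySem.List.mem_enumerate_iff, PySem.Set.contains_iff]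
  constructor
  · rintro ⟨p, ⟨⟨k, hk, rfl⟩, hmem⟩, rfl⟩
    exact ⟨k, hk, by simp, hmem⟩
  · rintro ⟨m, hm, rfl, hmem⟩
    exact ⟨((m : Int), words[m]), ⟨⟨m, hm, by simp⟩, hmem⟩, rfl⟩

-- membership in a clamped drop/take slice, by absolute index
lemma mem_take_drop {α : Type} (l : List α) (a n : Nat) (x : α) :
    x ∈ (l.drop a).take n ↔ ∃ j : Nat, a ≤ j ∧ j < a + n ∧ ∃ h : j < l.length, l[j] = x := by
  simp only [List.mem_iff_getElem?, List.getElem?_take, List.getElem?_drop]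
  constructor
  · rintro ⟨i, hi⟩
    split_ifs at hi with hlt
    · obtain ⟨h', rfl⟩ := List.getElem?_eq_some_iff.mp hi
      exact ⟨a + i, by omega, by omega, h', rfl⟩
  · rintro ⟨j, hja, hjn, hjl, rfl⟩
    refine ⟨j - a, ?_⟩
    rw [if_pos (by omega)]
    have : a + (j - a) = j := by omega
    rw [this, List.getElem?_eq_getElem hjl]

-- the per-token condition: A's slice ∩ negations nonempty ↔ B's |i-j| ≤ window test
lemma key_lemma (words : List String) (window : Int) (hw : 0 ≤ window) (k : Nat) (hk : k < words.length) :
    (!(PySem.Set.inter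
        (PySem.Set.ofList
          (PySem.List.slice words (some (max 0 ((k : Int) - window)))
            (some (min (words.length : Int) ((k : Int) + window + 1)))))
        pvNegations).isEmpty)
    = (pvNegIdx words).any (fun j => decide ((k : Int) - window ≤ j) && decide (j ≤ (k : Int) + window)) := by
  rw [Bool.eq_iff_iff]
  rw [PySem.List.slice_toNat words (by omega) (by omega)]
  rw [Bool.not_eq_true', List.isEmpty_eq_false_iff_exists_mem]
  rw [List.any_eq_true]
  constructor
  · rintro ⟨x, hx⟩
    rw [PySem.Set.mem_inter, PySem.Set.mem_ofList, mem_take_drop] at hx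
    obtain ⟨⟨j, hja, hjn, hjl, rfl⟩, hneg⟩ := hx
    refine ⟨(j : Int), ?_, ?_⟩
    · exact (mem_pvNegIdx words _).mpr ⟨j, hjl, rfl, hneg⟩
    · simp only [Bool.and_eq_true, decide_eq_true_eq]; omega
  · rintro ⟨j, hjmem, hcond⟩
    simp only [Bool.and_eq_true, decide_eq_true_eq] at hcond
    obtain ⟨m, hm, rfl, hneg⟩ := (mem_pvNegIdx words j).mp hjmem
    refine ⟨words[m], ?_⟩
    rw [PySem.Set.mem_inter, PySem.Set.mem_ofList, mem_take_drop]
    exact ⟨⟨m, by omega, by omega, hm, rfl⟩, hneg⟩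

-- for a very negative window A's (possibly wrapped) slice is empty, so both loops find nothing
lemma neg_window_lemma (text term : String) (window : Int) (hw : window < 0)
    (hlen : ((PySem.Str.split₀ text).length : Int) + 2 * window + 1 ≤ 0) :
    has_negation_window_py text term window = has_negation_window_py_alt text term window := by
  unfold has_negation_window_py has_negation_window_py_alt
  rw [List.any_eq_false.mpr, List.any_eq_false.mpr]
  · intro p hp
    obtain ⟨k, hk, rfl⟩ := (PySem.List.mem_enumerate_iff _ _ p).mp hp
    simp only [zero_add, Bool.and_eq_true, List.any_eq_true, Bool.and_eq_true, decide_eq_true_eq]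
    rintro ⟨-, j, -, hlo, hhi⟩
    omega
  · intro p hp
    obtain ⟨k, hk, rfl⟩ := (PySem.List.mem_enumerate_iff _ _ p).mp hp
    simp only [zero_add]
    have hempty : PySem.List.slice (PySem.Str.split₀ text) (some (max 0 ((k : Int) - window)))
        (some (min ((PySem.Str.split₀ text).length : Int) ((k : Int) + window + 1))) = [] := by
      apply List.eq_nil_of_length_eq_zero
      rw [PySem.List.length_slice]
      simp only [PySem.List.clampIdx]
      split_ifs <;> omega
    rw [hempty]
    simp [PySem.Set.ofList, PySem.Set.inter]

-- ===== VERDICT (by name: the statement is the Claim_ definition above) =====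
theorem has_negation_window_py_spec : Claim_equal_has_negation_window_py := by
  intro text term window _ hw
  unfold Spec_has_negation_window_py
  by_cases h0 : 0 ≤ window
  · unfold has_negation_window_py has_negation_window_py_alt
    apply PySem.List.any_congr_mem
    intro p hp
    obtain ⟨k, hk, rfl⟩ := (PySem.List.mem_enumerate_iff _ _ p).mp hp
    simp only [zero_add]
    congr 1
    exact key_lemma _ window h0 k hk
  · rcases hw with h | h
    · exact absurd h h0
    · exact neg_window_lemma text term window (by omega) h
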